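-- pv_equiv track=rewrite | github.com/Sergiogd112/pynote | main.py | get_srtiped_ppath
-- ===== SOURCE A (Python) =====
-- def get_srtiped_ppath(uksorder, value, parent):
--     if len(value) > 0 and value[0] == "-":
--         value = value[1:].strip()
--     if len(parent) > 0 and parent[0] == "-":
--         parent = parent[1:].strip()
--     idx = uksorder.index(value)
--     for val in uksorder[:idx][::-1]:
--         if parent == val.split("@#$")[0][-len(parent) :]:
--             return val
--     else:
--         return uksorder[0]
-- ===== SOURCE B (Python) =====
-- def get_srtiped_ppath(uksorder, value, parent):
--     # One forward pass: remember the latest parent-matching element seen before value.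
--     if len(value) > 0 and value[0] == "-":
--         value = value[1:].strip()
--     if len(parent) > 0 and parent[0] == "-":
--         parent = parent[1:].strip()
--     last = None
--     for val in uksorder:
--         if val == value:
--             return last if last is not None else uksorder[0]
--         if parent == val.split("@#$")[0][-len(parent):]:
--             last = val
--     raise ValueError(f"{value!r} is not in list")
-- ===== Notes on version B (the rewrite author's own statement) =====
-- stated objective: alternative
-- what changed: Replaces A's .index scan plus a second reversed scan over the prefix with a single forward pass that remembers the latest parent-matching element and stops at the first occurrence of value.
import Mathlib
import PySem

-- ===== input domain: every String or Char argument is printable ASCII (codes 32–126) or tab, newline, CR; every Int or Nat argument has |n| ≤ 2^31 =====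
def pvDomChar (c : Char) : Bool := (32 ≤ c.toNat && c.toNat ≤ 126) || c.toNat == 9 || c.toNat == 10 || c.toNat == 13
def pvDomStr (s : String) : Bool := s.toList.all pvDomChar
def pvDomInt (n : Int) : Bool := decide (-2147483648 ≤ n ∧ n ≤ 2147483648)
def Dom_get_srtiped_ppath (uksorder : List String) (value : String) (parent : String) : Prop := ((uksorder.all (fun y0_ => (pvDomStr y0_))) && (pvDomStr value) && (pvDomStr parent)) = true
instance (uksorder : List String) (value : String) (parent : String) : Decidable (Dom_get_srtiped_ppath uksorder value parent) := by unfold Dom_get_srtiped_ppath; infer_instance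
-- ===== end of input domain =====

-- B replaces A's .index + reversed-prefix scan with a single forward pass carrying the
-- latest parent-matching element ("alternative": one pass instead of two, same cost class).

-- ===== PORT A =====

-- shared by both ports: the leading "-" normalization (identical lines in both Pythons)
def pvNorm (s : String) : String :=
  if PySem.Str.len s > 0 ∧ PySem.Str.pyGet? s 0 = some '-' then
    PySem.Str.strip (PySem.Str.slice s (some 1) none)
  else s

-- shared by both ports: parent == val.split("@#$")[0][-len(parent):]
def pvMatch (parent val : String) : Bool :=
  let part := (((PySem.Str.split? val "@#$").getD []).headD "")
  parent == PySem.Str.slice part (some (-(PySem.Str.len parent : Int))) none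

def get_srtiped_ppath (uksorder : List String) (value : String) (parent : String) : String :=
  let value := pvNorm value
  let parent := pvNorm parent
  match PySem.List.index? uksorder value with
  | none => ""   -- ValueError: excluded by Pre_
  | some idx =>
    -- uksorder[:idx][::-1], scanned with first-match-returns (the for/return loop)
    match ((uksorder.take idx).reverse).find? (pvMatch parent) with
    | some v => v
    | none => uksorder.headD ""   -- uksorder[0]; nonempty since index succeeded

-- ===== PORT B =====
def pvGoB (head0 value parent : String) (last : Option String) : List String → String
  | [] => ""   -- ValueError: excluded by Pre_
  | v :: rest =>
    if v == value then (last.getD head0)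
    else pvGoB head0 value parent (if pvMatch parent v then some v else last) rest

def get_srtiped_ppath_alt (uksorder : List String) (value : String) (parent : String) : String :=
  pvGoB (uksorder.headD "") (pvNorm value) (pvNorm parent) none uksorder

-- ===== PRECONDITION & SPEC =====
-- Pre_ excludes exactly the inputs where .index raises ValueError (normalized value absent);
-- B raises there as well.
def Pre_get_srtiped_ppath (uksorder : List String) (value : String) (parent : String) : Prop :=
  pvNorm value ∈ uksorder
instance (uksorder : List String) (value : String) (parent : String) : Decidable (Pre_get_srtiped_ppath uksorder value parent) := by unfold Pre_get_srtiped_ppath; infer_instance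

def pvWitness_get_srtiped_ppath : List String × String × String := (["a@#$x", "b"], "b", "a")

def Spec_get_srtiped_ppath (uksorder : List String) (value : String) (parent : String) (out : String) : Prop := out = get_srtiped_ppath_alt uksorder value parent
instance (uksorder : List String) (value : String) (parent : String) (out : String) : Decidable (Spec_get_srtiped_ppath uksorder value parent out) := by unfold Spec_get_srtiped_ppath; infer_instance

-- ===== CLAIM (what is proved, stated in full; the proofs are below) =====
def Claim_equal_get_srtiped_ppath : Prop := ∀ (uksorder : List String) (value : String) (parent : String), Dom_get_srtiped_ppath uksorder value parent → Pre_get_srtiped_ppath uksorder value parent → Spec_get_srtiped_ppath uksorder value parent (get_srtiped_ppath uksorder value parent)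

-- ===== LEMMAS AND PROOFS =====

lemma pvGoB_spec (head0 parent value : String) :
    ∀ (l : List String) (last : Option String) (idx : ℕ),
      PySem.List.index? l value = some idx →
      pvGoB head0 value parent last l
        = ((((l.take idx).reverse).find? (pvMatch parent)).or last).getD head0 := by
  intro l
  induction l with
  | nil => intro last idx h; simp [PySem.List.index?_eq_idxOf?] at h
  | cons x rest ih =>
    intro last idx h
    by_cases hx : x = value
    · subst hx
      rw [PySem.List.index?_cons_self] at h
      cases h
      simp [pvGoB]
    · rw [PySem.List.index?_cons_of_ne rest hx] at h
      rcases Option.map_eq_some_iff.mp h with ⟨j, hj, rfl⟩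
      have hbx : (x == value) = false := by simp [hx]
      rw [show pvGoB head0 value parent last (x :: rest)
            = pvGoB head0 value parent (if pvMatch parent x then some x else last) rest from by
            simp [pvGoB, hbx]]
      rw [ih _ j hj]
      have htake : (x :: rest).take (j + 1) = x :: rest.take j := rfl
      rw [htake]
      simp only [List.reverse_cons, List.find?_append]
      by_cases hm : pvMatch parent x = true
      · simp [List.find?, hm]
      · simp [List.find?, hm]

-- ===== VERDICT (by name: the statement is the Claim_ definition above) =====
theorem get_srtiped_ppath_spec : Claim_equal_get_srtiped_ppath := by
  intro uks value parent _hDom hPre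
  unfold Spec_get_srtiped_ppath get_srtiped_ppath get_srtiped_ppath_alt
  have hmem : pvNorm value ∈ uks := hPre
  obtain ⟨idx, hidx⟩ := Option.isSome_iff_exists.mp
    ((PySem.List.index?_isSome_iff uks (pvNorm value)).mpr hmem)
  show (match PySem.List.index? uks (pvNorm value) with
        | none => ""
        | some idx =>
          match ((uks.take idx).reverse).find? (pvMatch (pvNorm parent)) with
          | some v => v
          | none => uks.headD "") = _
  rw [hidx, pvGoB_spec (uks.headD "") (pvNorm parent) (pvNorm value) uks none idx hidx]
  cases hf : ((uks.take idx).reverse).find? (pvMatch (pvNorm parent)) <;> simp [hf]
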